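-- pv_equiv track=rewrite | github.com/SohyunDev/Polynomial-Approximation | run2.py | getGetRnnParameter
-- ===== SOURCE A (Python) =====
-- def calculateQiRin(Qi, Rin):
--     result = [[]for _ in range (len(Qi))]
--     for rowindex in range(0,len(Qi)):
--         result[rowindex].append(Qi[rowindex][0]*Rin)
--     return result
--
-- def subColumns(column1, column2):
--     result = [[] for _ in range(len(column1))]
--     if(len(column1)==len(column2)):
--         for index in range(0,len(column1)):
--             result[index].append(column1[index][0]-column2[index][0])
--     return result
--
-- def getColumn(matrix, index):
--     column = [[]for _ in range(len(matrix))]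
--     for rowindex in range(0,len(matrix)):
--         column[rowindex].append(matrix[rowindex][index-1])
--     return column
--
-- def getGetRnnParameter(matrixA, matrixQ, matrixR, n):
--     result = getColumn(matrixA, n)
--     if(n == 1):
--         return result
--     else:
--         for index in range(1,n):
--             Qi = getColumn(matrixQ, index)
--             Rin = matrixR[index-1][n-1]
--             result = subColumns(result, calculateQiRin(Qi, Rin))
--     return result
-- ===== SOURCE B (Python) =====
-- def getGetRnnParameter(matrixA, matrixQ, matrixR, n):
--     result = []
--     for row in range(len(matrixA)):
--         val = matrixA[row][n - 1]
--         for index in range(1, n):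
--             val -= matrixQ[row][index - 1] * matrixR[index - 1][n - 1]
--         result.append([val])
--     return result
-- ===== Notes on version B (the rewrite author's own statement) =====
-- stated objective: simpler
-- what changed: Replaced the column-major pipeline (getColumn/calculateQiRin/subColumns rebuilding a full column of singleton rows per index) by a single row-major loop that keeps one scalar accumulator per row and subtracts each Q*R term in the same left-to-right order.
-- outside the precondition, e.g. on getGetRnnParameter([[1, 2], [3, 4]], [[1, 1]], [[0, 5]], 2): A returns [[], []], B raises IndexError
import Mathlib
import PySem

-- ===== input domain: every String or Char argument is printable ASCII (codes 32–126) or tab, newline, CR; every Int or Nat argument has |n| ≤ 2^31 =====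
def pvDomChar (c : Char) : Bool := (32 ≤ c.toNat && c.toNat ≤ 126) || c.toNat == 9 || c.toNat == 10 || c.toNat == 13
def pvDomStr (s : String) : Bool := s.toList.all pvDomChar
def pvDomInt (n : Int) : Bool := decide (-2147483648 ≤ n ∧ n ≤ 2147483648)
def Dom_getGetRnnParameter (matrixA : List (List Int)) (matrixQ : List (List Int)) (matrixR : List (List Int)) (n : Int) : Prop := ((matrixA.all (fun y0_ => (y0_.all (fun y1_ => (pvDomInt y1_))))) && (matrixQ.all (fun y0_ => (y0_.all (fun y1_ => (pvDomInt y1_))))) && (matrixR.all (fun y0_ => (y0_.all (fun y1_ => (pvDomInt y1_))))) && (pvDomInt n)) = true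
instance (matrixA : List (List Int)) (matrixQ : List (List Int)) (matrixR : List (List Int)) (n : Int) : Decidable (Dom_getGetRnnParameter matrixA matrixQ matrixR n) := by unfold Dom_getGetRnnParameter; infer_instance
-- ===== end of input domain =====

-- B replaces A's column-major helper pipeline by one row-major loop with a scalar accumulator (same cost, simpler).


-- ===== PORT A =====
def pvCalculateQiRin (Qi : List (List Int)) (Rin : Int) : List (List Int) :=
  Qi.map (fun row => [PySem.List.pyGetD row 0 0 * Rin])

def pvSubColumns (column1 column2 : List (List Int)) : List (List Int) :=
  if column1.length = column2.length then
    List.zipWith (fun r1 r2 => [PySem.List.pyGetD r1 0 0 - PySem.List.pyGetD r2 0 0]) column1 column2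
  else
    column1.map (fun _ => ([] : List Int))

def pvGetColumn (matrix : List (List Int)) (index : Int) : List (List Int) :=
  matrix.map (fun row => [PySem.List.pyGetD row (index - 1) 0])

def getGetRnnParameter (matrixA : List (List Int)) (matrixQ : List (List Int)) (matrixR : List (List Int)) (n : Int) : List (List Int) :=
  let result := pvGetColumn matrixA n
  if n = 1 then result
  else
    (PySem.List.pyRange 1 n 1).foldl
      (fun result index =>
        pvSubColumns result
          (pvCalculateQiRin (pvGetColumn matrixQ index)
            (PySem.List.pyGetD (PySem.List.pyGetD matrixR (index - 1) []) (n - 1) 0)))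
      result

-- ===== PORT B =====
def getGetRnnParameter_alt (matrixA : List (List Int)) (matrixQ : List (List Int)) (matrixR : List (List Int)) (n : Int) : List (List Int) :=
  (PySem.List.pyRange 0 (matrixA.length : Int) 1).foldl
    (fun result row =>
      result ++
        [[(PySem.List.pyRange 1 n 1).foldl
            (fun val index =>
              val -
                PySem.List.pyGetD (PySem.List.pyGetD matrixQ row []) (index - 1) 0 *
                  PySem.List.pyGetD (PySem.List.pyGetD matrixR (index - 1) []) (n - 1) 0)
            (PySem.List.pyGetD (PySem.List.pyGetD matrixA row []) (n - 1) 0)]])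
    []

-- ===== PRECONDITION & SPEC =====
-- Pre_ is exactly where the Python A returns normally, except that it also excludes the
-- inputs with n ≥ 2 and matrixA.length ≠ matrixQ.length: there A's subColumns guard
-- silently skips the subtraction and A returns a list of EMPTY rows, an accidental value
-- B's row-wise algorithm does not produce (B raises there when matrixQ is too short).
def Pre_getGetRnnParameter (matrixA : List (List Int)) (matrixQ : List (List Int)) (matrixR : List (List Int)) (n : Int) : Prop :=
  (∀ row ∈ matrixA, PySem.Raise.InRange row.length (n - 1)) ∧
  (2 ≤ n →
    matrixA.length = matrixQ.length ∧
    (∀ row ∈ matrixQ, n - 1 ≤ (row.length : Int)) ∧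
    n - 1 ≤ (matrixR.length : Int) ∧
    (∀ row ∈ matrixR.take (n - 1).toNat, PySem.Raise.InRange row.length (n - 1)))

instance (matrixA : List (List Int)) (matrixQ : List (List Int)) (matrixR : List (List Int)) (n : Int) : Decidable (Pre_getGetRnnParameter matrixA matrixQ matrixR n) := by unfold Pre_getGetRnnParameter; infer_instance

def pvWitness_getGetRnnParameter : List (List Int) × List (List Int) × List (List Int) × Int :=
  ([[1, 2], [3, 4]], [[5], [6]], [[7, 8]], 2)

def Spec_getGetRnnParameter (matrixA : List (List Int)) (matrixQ : List (List Int)) (matrixR : List (List Int)) (n : Int) (out : List (List Int)) : Prop := out = getGetRnnParameter_alt matrixA matrixQ matrixR n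
instance (matrixA : List (List Int)) (matrixQ : List (List Int)) (matrixR : List (List Int)) (n : Int) (out : List (List Int)) : Decidable (Spec_getGetRnnParameter matrixA matrixQ matrixR n out) := by unfold Spec_getGetRnnParameter; infer_instance

-- ===== CLAIM (what is proved, stated in full; the proofs are below) =====
def Claim_equal_getGetRnnParameter : Prop := ∀ (matrixA : List (List Int)) (matrixQ : List (List Int)) (matrixR : List (List Int)) (n : Int), Dom_getGetRnnParameter matrixA matrixQ matrixR n → Pre_getGetRnnParameter matrixA matrixQ matrixR n → Spec_getGetRnnParameter matrixA matrixQ matrixR n (getGetRnnParameter matrixA matrixQ matrixR n)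

-- ===== LEMMAS AND PROOFS =====

-- subColumns of a zipWith-shaped state against calculateQiRin(getColumn …) folds into the zipWith
theorem pv_zip3 (mA mQ : List (List Int)) (f : List Int → List Int → Int) (g : List Int → Int)
    (h : mA.length = mQ.length) :
    List.zipWith (fun r1 r2 => [PySem.List.pyGetD r1 0 0 - PySem.List.pyGetD r2 0 0])
        (List.zipWith (fun ra rq => [f ra rq]) mA mQ) (mQ.map (fun rq => [g rq]))
      = List.zipWith (fun ra rq => [f ra rq - g rq]) mA mQ := by
  induction mA generalizing mQ f with
  | nil => simp
  | cons a as ih =>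
    cases mQ with
    | nil => simp at h
    | cons q qs =>
      simp only [List.zipWith, List.map, PySem.List.pyGetD_zero_cons]
      exact congrArg _ (ih qs f (by simpa using h))

theorem pv_step (mA mQ : List (List Int)) (f : List Int → List Int → Int) (i R : Int)
    (h : mA.length = mQ.length) :
    pvSubColumns (List.zipWith (fun ra rq => [f ra rq]) mA mQ)
        (pvCalculateQiRin (pvGetColumn mQ i) R)
      = List.zipWith (fun ra rq => [f ra rq - PySem.List.pyGetD rq (i - 1) 0 * R]) mA mQ := by
  unfold pvSubColumns pvCalculateQiRin pvGetColumn
  rw [if_pos (by simp [h]), List.map_map]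
  exact pv_zip3 mA mQ f _ h

theorem pv_foldA (ixs : List Int) (mA mQ : List (List Int)) (Rf : Int → Int)
    (f : List Int → List Int → Int) (h : mA.length = mQ.length) :
    ixs.foldl
        (fun result index =>
          pvSubColumns result (pvCalculateQiRin (pvGetColumn mQ index) (Rf index)))
        (List.zipWith (fun ra rq => [f ra rq]) mA mQ)
      = List.zipWith
          (fun ra rq =>
            [ixs.foldl (fun v i => v - PySem.List.pyGetD rq (i - 1) 0 * Rf i) (f ra rq)]) mA mQ := by
  induction ixs generalizing f with
  | nil => rfl
  | cons i is ih =>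
    simp only [List.foldl_cons]
    rw [pv_step mA mQ f i (Rf i) h]
    exact ih (fun ra rq => f ra rq - PySem.List.pyGetD rq (i - 1) 0 * Rf i)

-- B's outer loop, unconditionally, as a map over row indices
theorem pv_altB (mA mQ mR : List (List Int)) (n : Int) :
    getGetRnnParameter_alt mA mQ mR n
      = (List.range mA.length).map
          (fun (k : Nat) =>
            [(PySem.List.pyRange 1 n 1).foldl
                (fun val index =>
                  val -
                    PySem.List.pyGetD (PySem.List.pyGetD mQ (k : Int) []) (index - 1) 0 *
                      PySem.List.pyGetD (PySem.List.pyGetD mR (index - 1) []) (n - 1) 0)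
                (PySem.List.pyGetD (PySem.List.pyGetD mA (k : Int) []) (n - 1) 0)]) := by
  unfold getGetRnnParameter_alt
  rw [PySem.List.foldl_append_singleton_eq_map, PySem.List.pyRange_zero_nat, List.map_map]
  rfl

theorem pv_getD_int (mA : List (List Int)) (k : Nat) (hk : k < mA.length) :
    PySem.List.pyGetD mA (k : Int) ([] : List Int) = mA[k] := by
  simp [PySem.List.pyGetD_natCast, hk]

-- n ≤ 1 or n = 1: both programs are the map row ↦ [row[n-1]]
theorem pv_small (mA mQ mR : List (List Int)) (n : Int) (h : PySem.List.pyRange 1 n 1 = []) :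
    getGetRnnParameter_alt mA mQ mR n = pvGetColumn mA n := by
  rw [pv_altB, h]
  unfold pvGetColumn
  apply List.ext_getElem (by simp)
  intro k h1 h2
  simp only [List.getElem_map, List.getElem_range, List.foldl_nil]
  rw [pv_getD_int mA k (by simpa using h1)]

theorem pv_map_eq_zip (mA mQ : List (List Int)) (F : List Int → List Int → List Int)
    (h : mA.length = mQ.length) :
    (List.range mA.length).map
        (fun (k : Nat) => F (PySem.List.pyGetD mA (k : Int) []) (PySem.List.pyGetD mQ (k : Int) []))
      = List.zipWith F mA mQ := by
  apply List.ext_getElem (by simp [h])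
  intro k h1 h2
  simp only [List.getElem_map, List.getElem_range, List.getElem_zipWith]
  rw [pv_getD_int mA k (by simpa using h1), pv_getD_int mQ k (by simp at h1; omega)]

theorem pv_getColumn_zip (mA mQ : List (List Int)) (n : Int) (h : mA.length = mQ.length) :
    pvGetColumn mA n
      = List.zipWith (fun ra _ => [PySem.List.pyGetD ra (n - 1) 0]) mA mQ := by
  unfold pvGetColumn
  rw [← pv_map_eq_zip mA mQ _ h]
  apply List.ext_getElem (by simp)
  intro k h1 h2
  simp only [List.getElem_map, List.getElem_range]
  rw [pv_getD_int mA k (by simpa using h1)]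

-- ===== VERDICT (by name: the statement is the Claim_ definition above) =====
theorem getGetRnnParameter_spec : Claim_equal_getGetRnnParameter := by
  intro mA mQ mR n _ hPre
  unfold Spec_getGetRnnParameter getGetRnnParameter
  by_cases h1 : n = 1
  · subst h1
    exact (pv_small mA mQ mR 1 (PySem.List.pyRange_one_eq_nil (by omega))).symm
  · rw [if_neg h1]
    by_cases h2 : 2 ≤ n
    · obtain ⟨hlen, _, _, _⟩ := hPre.2 h2
      rw [pv_getColumn_zip mA mQ n hlen,
        pv_foldA (PySem.List.pyRange 1 n 1) mA mQ
          (fun i => PySem.List.pyGetD (PySem.List.pyGetD mR (i - 1) []) (n - 1) 0)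
          (fun ra _ => PySem.List.pyGetD ra (n - 1) 0) hlen,
        pv_altB mA mQ mR n,
        pv_map_eq_zip mA mQ
          (fun ra rq =>
            [(PySem.List.pyRange 1 n 1).foldl
                (fun val index =>
                  val -
                    PySem.List.pyGetD rq (index - 1) 0 *
                      PySem.List.pyGetD (PySem.List.pyGetD mR (index - 1) []) (n - 1) 0)
                (PySem.List.pyGetD ra (n - 1) 0)]) hlen]
    · have hnil : PySem.List.pyRange 1 n 1 = [] := PySem.List.pyRange_one_eq_nil (by omega)
      rw [hnil, List.foldl_nil]
      exact (pv_small mA mQ mR n hnil).symm
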